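-- pv_equiv track=rewrite | github.com/1972007/Tugas_Besar | BranchAndBound.py | min_skip_minus
-- ===== SOURCE A (Python) =====
-- from typing import List
--
-- def min_skip_minus(arr:List):
--     arr1=[]
--     mini=-1
--     for i in range(len(arr)):
--         if(arr[i]>=0):
--             arr1.append(arr[i])
--     if(len(arr1)>0):
--         mini=arr1[0]
--         for i in range(len(arr1)):
--             if(mini>arr1[i]):
--                 mini=arr1[i]
--     return mini
-- ===== SOURCE B (Python) =====
-- def min_skip_minus(arr):
--     found = False
--     mini = -1
--     for x in arr:
--         if x >= 0:
--             if not found: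
--                 found = True
--                 mini = x
--             elif x < mini:
--                 mini = x
--     return mini
-- ===== Notes on version B (the rewrite author's own statement) =====
-- stated objective: simpler
-- what changed: Replaced the filtered intermediate list plus a second minimum pass with one pass over arr keeping a running minimum and a found flag.
import Mathlib
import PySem

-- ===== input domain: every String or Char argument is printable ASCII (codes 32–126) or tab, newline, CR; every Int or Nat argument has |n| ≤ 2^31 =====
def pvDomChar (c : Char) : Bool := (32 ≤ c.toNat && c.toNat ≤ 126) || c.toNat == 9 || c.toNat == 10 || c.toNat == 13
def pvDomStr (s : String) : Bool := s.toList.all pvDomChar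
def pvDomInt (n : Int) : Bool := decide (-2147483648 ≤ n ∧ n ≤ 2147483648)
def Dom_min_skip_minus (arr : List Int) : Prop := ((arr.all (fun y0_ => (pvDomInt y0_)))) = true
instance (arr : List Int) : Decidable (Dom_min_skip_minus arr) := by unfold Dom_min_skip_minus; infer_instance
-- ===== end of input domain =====

-- B collapses A's two passes (filter into arr1, then minimum of arr1) into one pass with a running minimum and a found flag; same result, simpler.

-- ===== PORT A =====
def min_skip_minus (arr : List Int) : Int :=
  -- arr1: the filter loop appending arr[i] when arr[i] >= 0
  let arr1 := arr.foldl (fun a x => if x ≥ 0 then a ++ [x] else a) []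
  match arr1 with
  | [] => -1
  | h :: _ =>
      -- mini = arr1[0]; then the second loop over all of arr1
      arr1.foldl (fun mini x => if mini > x then x else mini) h

-- ===== PORT B =====
-- one pass: state is (found, mini) encoded as Option Int (none = not found)
def min_skip_minus_alt (arr : List Int) : Int :=
  match arr.foldl
      (fun best x =>
        if x ≥ 0 then
          match best with
          | none => some x
          | some m => if x < m then some x else some m
        else best) none with
  | none => -1
  | some m => m

-- ===== PRECONDITION & SPEC =====
def Spec_min_skip_minus (arr : List Int) (out : Int) : Prop := out = min_skip_minus_alt arr
instance (arr : List Int) (out : Int) : Decidable (Spec_min_skip_minus arr out) := by unfold Spec_min_skip_minus; infer_instance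

-- ===== CLAIM (what is proved, stated in full; the proofs are below) =====
def Claim_equal_min_skip_minus : Prop := ∀ (arr : List Int), Dom_min_skip_minus arr → Spec_min_skip_minus arr (min_skip_minus arr)

-- ===== LEMMAS AND PROOFS =====

-- A's filter loop builds acc ++ filter
lemma filterLoop_eq (arr : List Int) (acc : List Int) :
    arr.foldl (fun a x => if x ≥ 0 then a ++ [x] else a) acc
      = acc ++ arr.filter (fun x => x ≥ 0) := by
  induction arr generalizing acc with
  | nil => simp
  | cons h t ih =>
      by_cases hx : h ≥ 0 <;> simp [List.foldl, hx, ih]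

-- B's one-pass loop only moves on nonnegative elements, so it equals the
-- unconditional min-fold over the filtered list
lemma altLoop_eq_filter (arr : List Int) (b : Option Int) :
    arr.foldl
      (fun best x =>
        if x ≥ 0 then
          match best with
          | none => some x
          | some m => if x < m then some x else some m
        else best) b
    = (arr.filter (fun x => x ≥ 0)).foldl
      (fun best x =>
        match best with
        | none => some x
        | some m => if x < m then some x else some m) b := by
  induction arr generalizing b with
  | nil => rfl
  | cons h t ih =>
      by_cases hx : h ≥ 0 <;> simp [List.foldl, hx, ih]

-- once the option state is `some m`, B's loop is A's min loop
lemma optLoop_eq_minLoop (l : List Int) (m : Int) :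
    l.foldl
      (fun best x =>
        match best with
        | none => some x
        | some m => if x < m then some x else some m) (some m)
    = some (l.foldl (fun mini x => if mini > x then x else mini) m) := by
  induction l generalizing m with
  | nil => rfl
  | cons h t ih =>
      simp only [List.foldl]
      by_cases hx : h < m
      · have : m > h := hx
        simp [hx, ih]
      · have : ¬ m > h := hx
        simp [hx, ih]

-- A's min loop starting at h over h :: t never changes on the first step
lemma minLoop_self (h : Int) (t : List Int) :
    (h :: t).foldl (fun mini x => if mini > x then x else mini) h
      = t.foldl (fun mini x => if mini > x then x else mini) h := by
  simp [List.foldl]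

-- ===== VERDICT (by name: the statement is the Claim_ definition above) =====
theorem min_skip_minus_spec : Claim_equal_min_skip_minus := by
  intro arr _
  unfold Spec_min_skip_minus min_skip_minus min_skip_minus_alt
  rw [filterLoop_eq, altLoop_eq_filter]
  cases hf : arr.filter (fun x => x ≥ 0) with
  | nil => simp
  | cons h t =>
      simp only [List.nil_append, minLoop_self, List.foldl]
      rw [optLoop_eq_minLoop]
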